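-- pv_equiv track=rewrite | github.com/Ashmitcodez/similarity-detector-web-app | RightMin.py | RightMin
-- ===== SOURCE A (Python) =====
-- def RightMin(values):
--     """
--     Find the minimum value in a list and its rightmost index.
--
--     Args:
--         values (list): A list of comparable elements.
--
--     Returns:
--         tuple: (min_value, rightmost_index)
--     """
--     if not values:
--         raise ValueError("Input list is empty.")
--
--     min_value = min(values)
--     rightmost_index = -1
--
--     for i in range(len(values)):
--         if values[i] == min_value:
--             rightmost_index = i
--
--     return (min_value, rightmost_index)
-- ===== SOURCE B (Python) =====
-- def RightMin(values):
--     """Find the minimum value in a list and its rightmost index (single pass)."""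
--     if not values:
--         raise ValueError("Input list is empty.")
--     min_value = values[0]
--     idx = 0
--     for i in range(1, len(values)):
--         if values[i] <= min_value:
--             min_value = values[i]
--             idx = i
--     return (min_value, idx)
-- ===== Notes on version B (the rewrite author's own statement) =====
-- stated objective: simpler
-- what changed: one fused pass that tracks the running minimum and its rightmost index together (updating on <=) instead of computing min() first and then re-scanning the whole list for the last equal element
import Mathlib
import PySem

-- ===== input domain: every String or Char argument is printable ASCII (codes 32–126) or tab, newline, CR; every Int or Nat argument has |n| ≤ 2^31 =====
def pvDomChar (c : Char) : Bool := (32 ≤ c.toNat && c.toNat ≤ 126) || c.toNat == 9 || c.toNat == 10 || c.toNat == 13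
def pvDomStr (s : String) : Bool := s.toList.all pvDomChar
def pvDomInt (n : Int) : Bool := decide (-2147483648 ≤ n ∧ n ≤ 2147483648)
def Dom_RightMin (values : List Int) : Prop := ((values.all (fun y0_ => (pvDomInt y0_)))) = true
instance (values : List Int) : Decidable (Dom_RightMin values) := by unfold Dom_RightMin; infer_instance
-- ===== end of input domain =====

-- B fuses A's two passes (min() then a rightmost-equality scan) into one pass that
-- tracks the running minimum and its rightmost index together; objective: simpler.


-- ===== PORT A =====
-- min(values) → PySem.List.min? (none = empty, where Python raises ValueError);
-- the loop 'for i in range(len(values))' → foldl over List.range; values[i] with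
-- i always in range → getD (exact here).
def RightMin (values : List Int) : Int × Int :=
  match PySem.List.min? values (fun y => y) with
  | none => (0, 0)  -- unreachable under Pre_ (Python raises ValueError)
  | some m =>
      let idx := (List.range values.length).foldl
        (fun acc i => if values.getD i 0 = m then (i : Int) else acc) (-1)
      (m, idx)

-- ===== PORT B =====
-- single pass: 'for i in range(1, len(values))' → foldl over List.range' 1 (n-1),
-- carrying (min_value, idx); values[i] with i in range → getD (exact here).
def RightMin_alt (values : List Int) : Int × Int :=
  match values with
  | [] => (0, 0)  -- unreachable under Pre_ (B raises ValueError too)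
  | v :: _ =>
      (List.range' 1 (values.length - 1)).foldl
        (fun (s : Int × Int) i =>
          if values.getD i 0 ≤ s.1 then (values.getD i 0, (i : Int)) else s)
        (v, 0)

-- ===== PRECONDITION & SPEC =====
-- Pre_ excludes only the empty list, on which A (and B) raise ValueError.
def Pre_RightMin (values : List Int) : Prop := values ≠ []
instance (values : List Int) : Decidable (Pre_RightMin values) := by unfold Pre_RightMin; infer_instance
def pvWitness_RightMin : List Int := [3, 1, 2, 1]

def Spec_RightMin (values : List Int) (out : Int × Int) : Prop := out = RightMin_alt values
instance (values : List Int) (out : Int × Int) : Decidable (Spec_RightMin values out) := by unfold Spec_RightMin; infer_instance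

-- ===== CLAIM (what is proved, stated in full; the proofs are below) =====
def Claim_equal_RightMin : Prop := ∀ (values : List Int), Dom_RightMin values → Pre_RightMin values → Spec_RightMin values (RightMin values)

-- ===== LEMMAS AND PROOFS =====

-- A's second pass, as a function of the scan length: rightmost index < k whose value is m.
def scanIdx (values : List Int) (m : Int) (k : Nat) : Int :=
  (List.range k).foldl (fun acc i => if values.getD i 0 = m then (i : Int) else acc) (-1)

-- running minimum of values[0..k]
def minUpTo (values : List Int) : Nat → Int
  | 0 => values.getD 0 0
  | k + 1 => min (minUpTo values k) (values.getD (k + 1) 0)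

theorem scanIdx_succ (values : List Int) (m : Int) (k : Nat) :
    scanIdx values m (k + 1) =
      if values.getD k 0 = m then (k : Int) else scanIdx values m k := by
  simp [scanIdx, List.range_succ]

-- the single-pass loop invariant: after processing indices 1..k, B's state is
-- (min of values[0..k], rightmost index ≤ k achieving it, as A's scan computes it)
theorem B_inv (v : Int) (t : List Int) (k : Nat) :
    (List.range' 1 k).foldl
        (fun (s : Int × Int) i =>
          if (v :: t).getD i 0 ≤ s.1 then ((v :: t).getD i 0, (i : Int)) else s)
        (v, 0)
      = (minUpTo (v :: t) k, scanIdx (v :: t) (minUpTo (v :: t) k) (k + 1)) := by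
  induction k with
  | zero => simp [minUpTo, scanIdx, List.range_succ]
  | succ k ih =>
      rw [List.range'_concat, List.foldl_append, ih]
      simp only [List.foldl_cons, List.foldl_nil]
      have h1 : 1 + 1 * k = k + 1 := by omega
      rw [h1]
      by_cases h : (v :: t).getD (k + 1) 0 ≤ minUpTo (v :: t) k
      · have hm : minUpTo (v :: t) (k + 1) = (v :: t).getD (k + 1) 0 := by
          simp only [minUpTo]
          exact min_eq_right h
        rw [if_pos h, hm, scanIdx_succ _ _ (k + 1), if_pos rfl]
      · have hm : minUpTo (v :: t) (k + 1) = minUpTo (v :: t) k := by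
          simp only [minUpTo]
          exact min_eq_left (le_of_not_ge h)
        rw [if_neg h, hm, scanIdx_succ _ _ (k + 1),
            if_neg (fun he => h (le_of_eq he))]

-- the running minimum agrees with Python's min (a left fold of `min`)
theorem minUpTo_eq (v : Int) (t : List Int) (k : Nat) (hk : k ≤ t.length) :
    minUpTo (v :: t) k = (t.take k).foldl min v := by
  induction k with
  | zero => simp [minUpTo]
  | succ k ih =>
      have hk' : k < t.length := by omega
      have : t.take (k + 1) = t.take k ++ [t[k]] := by
        rw [List.take_add_one]
        simp [List.getElem?_eq_getElem hk']
      rw [this, List.foldl_append]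
      simp only [List.foldl_cons, List.foldl_nil, minUpTo]
      rw [ih (by omega)]
      congr 1
      simp [List.getD_eq_getElem?_getD, List.getElem?_eq_getElem hk']

-- ===== VERDICT (by name: the statement is the Claim_ definition above) =====
theorem RightMin_spec : Claim_equal_RightMin := by
  intro values _ hpre
  unfold Spec_RightMin
  match values with
  | [] => exact absurd rfl hpre
  | v :: t =>
      rw [RightMin, RightMin_alt]
      rw [PySem.List.min?_id_cons]
      simp only [List.length_cons, Nat.add_sub_cancel]
      rw [B_inv v t t.length]
      rw [minUpTo_eq v t t.length le_rfl, List.take_length]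
      rfl
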